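-- pv_equiv track=rewrite | github.com/Nikhilesh-B/CompetitiveProgrammingPractice | codeforces/Rating_scores/1200/playing_in_a_casino.py | process
-- ===== SOURCE A (Python) =====
-- def process(c):
--     total = 0
--     for row in c:
--         row.sort()
--         lsum = 0
--         for i, num in enumerate(row):
--             if i == 0:
--                 continue
--             else:
--                 lsum += num-row[0]
--         total += lsum
--
--         for i, num in enumerate(row):
--             if i == 0:
--                 continue
--             else:
--                 lsum = lsum-(len(row)-i)*(num-row[i-1])
--                 total += lsum
--
--     return total
-- ===== SOURCE B (Python) =====
-- def process(c):
--     total = 0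
--     for row in c:
--         row.sort()
--         m = len(row)
--         for i, x in enumerate(row):
--             total += (2 * i - (m - 1)) * x
--     return total
-- ===== Notes on version B (the rewrite author's own statement) =====
-- stated objective: simpler
-- what changed: Replaces A's two-pass incremental running-sum bookkeeping per row with a single pass over the sorted row adding the closed-form coefficient (2*i-(m-1))*row[i]; the in-place row.sort() is kept.
import Mathlib
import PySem

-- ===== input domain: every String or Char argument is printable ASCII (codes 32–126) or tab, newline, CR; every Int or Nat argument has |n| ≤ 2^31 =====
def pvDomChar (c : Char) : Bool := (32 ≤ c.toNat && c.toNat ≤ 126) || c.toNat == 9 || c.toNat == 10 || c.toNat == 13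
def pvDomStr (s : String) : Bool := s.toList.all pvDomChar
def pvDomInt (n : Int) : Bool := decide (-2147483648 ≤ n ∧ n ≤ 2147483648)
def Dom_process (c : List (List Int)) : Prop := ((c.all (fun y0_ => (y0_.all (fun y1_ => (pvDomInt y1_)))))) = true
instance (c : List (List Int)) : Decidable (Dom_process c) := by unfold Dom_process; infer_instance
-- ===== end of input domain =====

-- B replaces A's two-pass running-sum bookkeeping per row by one closed-form weighted pass
-- over the sorted row; both A and B sort each row IN PLACE (same mutation); return values proved equal.

-- ===== PORT A =====
-- first inner loop: for i, num in enumerate(row): if i == 0: continue else lsum += num - row[0]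
-- row[0] is only read when i ≥ 1 (so the row is nonempty): getD 0 0 is exact there.
def loopA1 (r : List Int) : Nat → List Int → Int → Int
  | _, [], lsum => lsum
  | i, num :: rest, lsum =>
    if i = 0 then loopA1 r (i+1) rest lsum
    else loopA1 r (i+1) rest (lsum + (num - r.getD 0 0))

-- second inner loop: lsum -= (len(row)-i)*(num-row[i-1]); total += lsum (skipping i = 0)
-- row[i-1] is only read when 1 ≤ i < len(row): getD (i-1) 0 is exact there.
def loopA2 (r : List Int) : Nat → List Int → Int → Int → Int
  | _, [], _, total => total
  | i, num :: rest, lsum, total =>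
    if i = 0 then loopA2 r (i+1) rest lsum total
    else
      let lsum' := lsum - ((r.length : Int) - (i : Int)) * (num - r.getD (i-1) 0)
      loopA2 r (i+1) rest lsum' (total + lsum')

def process (c : List (List Int)) : Int :=
  c.foldl (fun total row =>
    let r := PySem.List.sorted row (fun x => x) false
    let lsum := loopA1 r 0 r 0
    let total := total + lsum
    loopA2 r 0 r lsum total) 0

-- ===== PORT B =====
-- for i, x in enumerate(row): total += (2*i - (m-1)) * x
def loopB (m : Int) : Nat → List Int → Int → Int
  | _, [], total => total
  | i, x :: rest, total => loopB m (i+1) rest (total + (2*(i:Int) - (m-1)) * x)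

def process_alt (c : List (List Int)) : Int :=
  c.foldl (fun total row =>
    let r := PySem.List.sorted row (fun x => x) false
    loopB (r.length : Int) 0 r total) 0

-- ===== PRECONDITION & SPEC =====
def Spec_process (c : List (List Int)) (out : Int) : Prop := out = process_alt c
instance (c : List (List Int)) (out : Int) : Decidable (Spec_process c out) := by unfold Spec_process; infer_instance

-- ===== CLAIM (what is proved, stated in full; the proofs are below) =====
def Claim_equal_process : Prop := ∀ (c : List (List Int)), Dom_process c → Spec_process c (process c)

-- ===== LEMMAS AND PROOFS =====

-- the common per-row value: F (x::t) = Σ_{y∈t} (y - x) + F t  (sum of pairwise differences)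
def pairF : List Int → Int
  | [] => 0
  | a :: t => (t.sum - t.length * a) + pairF t

theorem loopA1_eq (r : List Int) : ∀ (u : List Int) (i : Nat) (L : Int),
    loopA1 r (i+1) u L = L + u.sum - u.length * r.getD 0 0 := by
  intro u
  induction u with
  | nil => intro i L; simp [loopA1]
  | cons x t ih =>
    intro i L
    simp only [loopA1, Nat.succ_ne_zero, if_false]
    rw [ih (i+1)]
    simp only [List.length_cons, List.sum_cons]
    push_cast
    ring

theorem loopA2_eq (r : List Int) : ∀ (u : List Int) (i : Nat) (L T : Int),
    r.drop (i+1) = u → i + 1 ≤ r.length →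
    L = u.sum - u.length * r.getD i 0 →
    loopA2 r (i+1) u L T = T + pairF u := by
  intro u
  induction u with
  | nil => intro i L T _ _ _; simp [loopA2, pairF]
  | cons x t ih =>
    intro i L T hdrop hle hL
    have hlt : i + 1 < r.length := by
      have := congrArg List.length hdrop
      simp at this; omega
    have hx : r.getD (i+1) 0 = x := by
      have h0 : (List.drop (i+1) r)[0]'(by rw [hdrop]; simp) = x := by
        simp [hdrop]
      rw [List.getElem_drop] at h0
      rw [List.getD_eq_getElem r 0 hlt]
      simpa using h0
    have hdrop' : r.drop (i+1+1) = t := by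
      have h : r.drop (i+1+1) = (r.drop (i+1)).drop 1 := by
        rw [List.drop_drop]
      rw [h, hdrop]; simp
    have hlen : (r.length : Int) - ((i+1 : Nat) : Int) = (t.length : Int) + 1 := by
      have := congrArg List.length hdrop
      simp at this
      push_cast
      omega
    have hkey : L - ((r.length : Int) - ((i+1 : Nat) : Int)) * (x - r.getD (i+1-1) 0)
        = t.sum - t.length * x := by
      simp only [Nat.add_sub_cancel]
      rw [hL, hlen]
      simp only [List.length_cons, List.sum_cons]
      push_cast
      ring
    simp only [loopA2, Nat.succ_ne_zero, if_false]
    rw [ih (i+1) _ _ hdrop' (by omega) (by rw [hkey, hx])]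
    rw [hkey]
    simp [pairF]; ring

theorem rowA_eq (r : List Int) (total : Int) :
    loopA2 r 0 r (loopA1 r 0 r 0) (total + loopA1 r 0 r 0) = total + pairF r := by
  cases r with
  | nil => simp [loopA1, loopA2, pairF]
  | cons a t =>
    have h1 : loopA1 (a::t) 0 (a::t) 0 = t.sum - t.length * a := by
      show loopA1 (a::t) 0 (a::t) 0 = _
      simp only [loopA1]
      rw [loopA1_eq (a::t) t 0 0]
      simp
    rw [h1]
    show loopA2 (a::t) 0 (a::t) _ _ = _
    simp only [loopA2]
    rw [loopA2_eq (a::t) t 0 _ _ (by simp) (by simp) (by simp)]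
    simp [pairF]; ring

theorem loopB_eq (m : Int) : ∀ (u : List Int) (i : Nat) (T : Int),
    m = (i : Int) + u.length →
    loopB m i u T = T + pairF u + (i : Int) * u.sum := by
  intro u
  induction u with
  | nil => intro i T _; simp [loopB, pairF]
  | cons x t ih =>
    intro i T hm
    simp only [loopB]
    have hm' : m = (i : Int) + t.length + 1 := by simp only [List.length_cons] at hm; push_cast at hm; omega
    rw [ih (i+1) _ (by rw [hm']; push_cast; ring)]
    simp only [pairF, List.sum_cons]
    rw [hm']; push_cast; ring

theorem rowB_eq (r : List Int) (total : Int) :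
    loopB (r.length : Int) 0 r total = total + pairF r := by
  rw [loopB_eq (r.length : Int) r 0 total (by simp)]
  simp

theorem foldl_eq (cs : List (List Int)) : ∀ (t : Int),
    cs.foldl (fun total row =>
      let r := PySem.List.sorted row (fun x => x) false
      let lsum := loopA1 r 0 r 0
      let total := total + lsum
      loopA2 r 0 r lsum total) t
    = cs.foldl (fun total row =>
      let r := PySem.List.sorted row (fun x => x) false
      loopB (r.length : Int) 0 r total) t := by
  induction cs with
  | nil => intro t; rfl
  | cons row rest ih =>
    intro t
    simp only [List.foldl_cons]
    rw [ih]
    congr 1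
    rw [rowA_eq, rowB_eq]

-- ===== VERDICT (by name: the statement is the Claim_ definition above) =====
theorem process_spec : Claim_equal_process := by
  intro c _
  show process c = process_alt c
  unfold process process_alt
  exact foldl_eq c 0
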